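-- pv_equiv track=rewrite | github.com/AllenPeng0209/poker_god | apps/mobile/tools/third_party/poker_solver/python/src/cli/subgame_gui.py | _pow2_steps
-- ===== SOURCE A (Python) =====
-- from typing import Dict, List, Tuple
--
-- def _pow2_steps(count: int) -> List[int]:
--     steps = []
--     if count <= 0:
--         return steps
--     steps.append(5)
--     value = 10
--     while len(steps) < count:
--         steps.append(value)
--         value *= 2
--     return steps
-- ===== SOURCE B (Python) =====
-- from typing import List
--
-- def _pow2_steps(count: int) -> List[int]:
--     return [5 * 2**i for i in range(count)]
-- ===== Notes on version B (the rewrite author's own statement) =====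
-- stated objective: simpler
-- what changed: Replaces the doubling accumulator loop with a single comprehension computing each element by the closed form 5*2**i on its index.
import Mathlib
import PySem

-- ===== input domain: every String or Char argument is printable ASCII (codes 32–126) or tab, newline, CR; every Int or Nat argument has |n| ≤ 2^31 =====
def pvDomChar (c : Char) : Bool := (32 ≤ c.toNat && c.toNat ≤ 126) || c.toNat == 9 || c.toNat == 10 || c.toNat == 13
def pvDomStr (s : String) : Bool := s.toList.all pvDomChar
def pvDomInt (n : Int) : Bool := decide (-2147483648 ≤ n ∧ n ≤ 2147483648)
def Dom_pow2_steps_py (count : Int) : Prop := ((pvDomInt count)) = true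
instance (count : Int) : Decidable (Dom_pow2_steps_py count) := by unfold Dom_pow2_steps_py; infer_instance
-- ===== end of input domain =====

-- B replaces A's doubling-accumulator while loop by a closed-form comprehension 5*2^i per index (simpler).

-- ===== PORT A =====
-- the `while len(steps) < count` loop: appends `value`, doubles it, repeats
def pow2Loop (count : Int) (steps : List Int) (value : Int) : List Int :=
  if h : (steps.length : Int) < count then
    pow2Loop count (steps ++ [value]) (value * 2)
  else steps
termination_by (count - steps.length).toNat
decreasing_by simp; omega

def pow2_steps_py (count : Int) : List Int :=
  if count ≤ 0 then []
  else pow2Loop count [5] 10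

-- ===== PORT B =====
def pow2_steps_py_alt (count : Int) : List Int :=
  (PySem.List.pyRange 0 count 1).map (fun i => 5 * 2 ^ i.toNat)

-- ===== PRECONDITION & SPEC =====
def Spec_pow2_steps_py (count : Int) (out : List Int) : Prop := out = pow2_steps_py_alt count
instance (count : Int) (out : List Int) : Decidable (Spec_pow2_steps_py count out) := by unfold Spec_pow2_steps_py; infer_instance

-- ===== CLAIM (what is proved, stated in full; the proofs are below) =====
def Claim_equal_pow2_steps_py : Prop := ∀ (count : Int), Dom_pow2_steps_py count → Spec_pow2_steps_py count (pow2_steps_py count)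

-- ===== LEMMAS AND PROOFS =====

-- loop invariant: starting from the first k terms and value = 5*2^k, the loop fills up to count terms
theorem pow2Loop_closed (count : Int) (k : Nat) (hk : count ≤ (k : Int) + (count.toNat - k : Nat)) :
    pow2Loop count ((List.range k).map (fun i => 5 * 2 ^ i)) (5 * 2 ^ k)
      = (List.range (max count.toNat k)).map (fun i => (5 * 2 ^ i : Int)) := by
  generalize hn : count.toNat - k = n at hk
  induction n generalizing k with
  | zero =>
    rw [pow2Loop]
    have hle : ¬ ((((List.range k).map (fun i => (5 * 2 ^ i : Int))).length : Int) < count) := by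
      simp; omega
    rw [dif_neg hle]
    have : max count.toNat k = k := by omega
    rw [this]
  | succ n ih =>
    rw [pow2Loop]
    by_cases hlt : ((((List.range k).map (fun i => (5 * 2 ^ i : Int))).length : Int) < count)
    · rw [dif_pos hlt]
      have hlen : (((List.range k).map (fun i => (5 * 2 ^ i : Int))).length : Int) = k := by simp
      have hstep : ((List.range k).map (fun i => (5 * 2 ^ i : Int))) ++ [5 * 2 ^ k]
          = (List.range (k + 1)).map (fun i => (5 * 2 ^ i : Int)) := by
        rw [List.range_succ, List.map_append]; rfl
      have hval : (5 * 2 ^ k : Int) * 2 = 5 * 2 ^ (k + 1) := by ring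
      rw [hstep, hval]
      have h1 : count.toNat - (k + 1) = n := by omega
      rw [ih (k + 1) h1 (by push_cast at hk ⊢; omega)]
      have : max count.toNat (k + 1) = max count.toNat k := by
        rw [hlen] at hlt; omega
      rw [this]
    · rw [dif_neg hlt]
      simp at hlt
      have : max count.toNat k = k := by omega
      rw [this]

-- ===== VERDICT (by name: the statement is the Claim_ definition above) =====
theorem pow2_steps_py_spec : Claim_equal_pow2_steps_py := by
  intro count _
  unfold Spec_pow2_steps_py pow2_steps_py pow2_steps_py_alt
  rw [PySem.List.pyRange_one]
  by_cases h : count ≤ 0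
  · rw [if_pos h]
    have : (count - 0).toNat = 0 := by omega
    rw [this]; simp
  · rw [if_neg h]
    have h0 : (0 : Int) < count := by omega
    have h1 : ([5] : List Int) = (List.range 1).map (fun i => (5 * 2 ^ i : Int)) := by decide
    have h2 : (10 : Int) = 5 * 2 ^ 1 := by decide
    rw [h1, h2, pow2Loop_closed count 1 (by omega)]
    have hmax : max count.toNat 1 = (count - 0).toNat := by omega
    rw [hmax]
    simp
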